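-- pv_equiv track=rewrite | github.com/KEEMSY/Bae-joonHub- | 프로그래머스/2/42586. 기능개발/기능개발.py | solution
-- ===== SOURCE A (Python) =====
-- def solution(progresses, speeds):
--     answer = []
--     daysLeft = []
--
--     for progress, speed in zip(progresses, speeds):
--         if (100 - progress) % speed == 0:
--             daysLeft.append((100 - progress) // speed)
--         else:
--             daysLeft.append((100 - progress) // speed + 1)
--
--     while daysLeft:
--         deployDay = daysLeft.pop(0)
--         deployCount = 1
--
--         while daysLeft and daysLeft[0] <= deployDay:
--             deployCount += 1
--             daysLeft.pop(0)
--
--         answer.append(deployCount)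
--
--     return answer
-- ===== SOURCE B (Python) =====
-- def solution(progresses, speeds):
--     answer = []
--     leader = None
--     for p, s in zip(progresses, speeds):
--         days = -((p - 100) // s)  # ceil((100 - p) / s)
--         if leader is None or days > leader:
--             answer.append(1)
--             leader = days
--         else:
--             answer[-1] += 1
--     return answer
-- ===== Notes on version B (the rewrite author's own statement) =====
-- stated objective: faster
-- what changed: replaces the O(n^2) double while-loop with list.pop(0) by a single forward pass that keeps the current group's leader day and increments the last count in place, and computes ceiling days with one negated floor division instead of a remainder branch
import Mathlib
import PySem

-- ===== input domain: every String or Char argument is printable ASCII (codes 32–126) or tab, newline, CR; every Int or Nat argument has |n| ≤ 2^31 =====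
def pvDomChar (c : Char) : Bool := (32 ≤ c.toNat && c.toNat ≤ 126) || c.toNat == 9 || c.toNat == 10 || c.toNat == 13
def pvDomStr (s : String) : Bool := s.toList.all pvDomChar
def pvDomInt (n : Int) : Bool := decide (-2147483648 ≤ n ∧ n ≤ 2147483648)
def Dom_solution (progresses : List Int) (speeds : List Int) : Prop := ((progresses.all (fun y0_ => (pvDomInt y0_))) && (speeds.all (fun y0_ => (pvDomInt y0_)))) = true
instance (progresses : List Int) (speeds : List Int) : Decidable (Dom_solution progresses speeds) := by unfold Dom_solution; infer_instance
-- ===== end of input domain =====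

-- B replaces A's quadratic pop(0) grouping by one linear pass tracking the group leader day; return-value equivalence only.

-- ===== PORT A =====
-- inner while: pops leading elements ≤ d, returning (how many popped, remaining list)
def popLE (d : Int) : List Int → Int × List Int
  | [] => (0, [])
  | x :: xs => if x ≤ d then ((popLE d xs).1 + 1, (popLE d xs).2) else (0, x :: xs)

theorem popLE_len (d : Int) (xs : List Int) : (popLE d xs).2.length ≤ xs.length := by
  induction xs with
  | nil => simp [popLE]
  | cons x xs ih =>
      simp only [popLE]
      split
      · exact le_trans ih (Nat.le_succ _)
      · simp

-- outer while over daysLeft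
def groupA : List Int → List Int
  | [] => []
  | d :: rest => (1 + (popLE d rest).1) :: groupA (popLE d rest).2
termination_by l => l.length
decreasing_by exact Nat.lt_succ_of_le (popLE_len d rest)

def solution (progresses : List Int) (speeds : List Int) : List Int :=
  let daysLeft := (progresses.zip speeds).map (fun x =>
    if PySem.Int.mod (100 - x.1) x.2 = 0 then PySem.Int.floordiv (100 - x.1) x.2
    else PySem.Int.floordiv (100 - x.1) x.2 + 1)
  groupA daysLeft

-- ===== PORT B =====
-- state: (answer reversed, current leader day); answer[-1] += 1 is an increment of the head
def stepB (acc : List Int × Option Int) (x : Int × Int) : List Int × Option Int :=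
  let days := -(PySem.Int.floordiv (x.1 - 100) x.2)
  match acc.2 with
  | none => (1 :: acc.1, some days)
  | some l =>
      if l < days then (1 :: acc.1, some days)
      else (match acc.1 with | [] => [] | h :: t => (h + 1) :: t, acc.2)

def solution_alt (progresses : List Int) (speeds : List Int) : List Int :=
  ((progresses.zip speeds).foldl stepB ([], none)).1.reverse

-- ===== PRECONDITION & SPEC =====
-- Pre_ excludes exactly the inputs where Python A raises ZeroDivisionError: a zero speed among the zipped pairs.
def Pre_solution (progresses : List Int) (speeds : List Int) : Prop :=
  ∀ x ∈ progresses.zip speeds, x.2 ≠ 0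
instance (progresses : List Int) (speeds : List Int) : Decidable (Pre_solution progresses speeds) := by unfold Pre_solution; infer_instance

def pvWitness_solution : List Int × List Int := ([93, 30, 55, 60, 40, 95], [1, 30, 5, 5, 20, 4])

def Spec_solution (progresses : List Int) (speeds : List Int) (out : List Int) : Prop := out = solution_alt progresses speeds
instance (progresses : List Int) (speeds : List Int) (out : List Int) : Decidable (Spec_solution progresses speeds out) := by unfold Spec_solution; infer_instance

-- ===== CLAIM (what is proved, stated in full; the proofs are below) =====
def Claim_equal_solution : Prop := ∀ (progresses : List Int) (speeds : List Int), Dom_solution progresses speeds → Pre_solution progresses speeds → Spec_solution progresses speeds (solution progresses speeds)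

-- ===== LEMMAS AND PROOFS =====

-- ceiling division: A's remainder branch equals B's negated floor division (s ≠ 0)
theorem ceil_eq_pos (a s : Int) (hs : 0 < s) :
    (if PySem.Int.mod a s = 0 then PySem.Int.floordiv a s else PySem.Int.floordiv a s + 1)
      = -(PySem.Int.floordiv (-a) s) := by
  symm
  rw [PySem.Int.neg_floordiv_neg_eq_iff_of_pos (a := a) (b := s) hs]
  have hmul := PySem.Int.floordiv_mul_add_mod a s
  have hmod0 : 0 ≤ PySem.Int.mod a s := PySem.Int.mod_nonneg a hs
  have hmodlt : PySem.Int.mod a s < s := PySem.Int.mod_lt a hs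
  split_ifs with h
  · constructor <;> nlinarith
  · have hposm : 0 < PySem.Int.mod a s := lt_of_le_of_ne hmod0 (Ne.symm h)
    constructor <;> nlinarith

theorem ceil_eq (a s : Int) (hs : s ≠ 0) :
    (if PySem.Int.mod a s = 0 then PySem.Int.floordiv a s else PySem.Int.floordiv a s + 1)
      = -(PySem.Int.floordiv (-a) s) := by
  rcases lt_or_gt_of_ne hs with hneg | hpos
  · have h := ceil_eq_pos (-a) (-s) (by omega)
    rw [PySem.Int.floordiv_neg_neg, PySem.Int.mod_neg_neg, neg_neg] at h
    simp only [neg_eq_zero] at h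
    rw [h, ← PySem.Int.floordiv_neg_neg a (-s), neg_neg]
  · exact ceil_eq_pos a s hpos

-- the day count B computes for a pair
def dayB (x : Int × Int) : Int := -(PySem.Int.floordiv (x.1 - 100) x.2)

-- the fold over a tail with a live group (leader l, reversed answer c :: tail)
theorem foldB_group (zs : List (Int × Int)) : ∀ (c : Int) (tail : List Int) (l : Int),
    ((zs.foldl stepB (c :: tail, some l)).1).reverse
      = tail.reverse ++ ((c + (popLE l (zs.map dayB)).1) :: groupA ((popLE l (zs.map dayB)).2)) := by
  induction zs with
  | nil => intro c tail l; simp [popLE, groupA]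
  | cons z zs ih =>
      intro c tail l
      simp only [List.map_cons]
      by_cases h : l < dayB z
      · have h' := h; unfold dayB at h'
        have hstep : stepB (c :: tail, some l) z = (1 :: c :: tail, some (dayB z)) := by
          simp [stepB, dayB, h']
        have hpop : popLE l (dayB z :: zs.map dayB) = (0, dayB z :: zs.map dayB) := by
          have hx : ¬ dayB z ≤ l := not_le.mpr h
          simp [popLE, hx]
        rw [List.foldl_cons, hstep, ih 1 (c :: tail) (dayB z), hpop]
        simp [groupA]
      · have h' := h; unfold dayB at h'
        have hstep : stepB (c :: tail, some l) z = ((c + 1) :: tail, some l) := by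
          simp [stepB, h']
        have hle : dayB z ≤ l := not_lt.mp h
        have hpop : popLE l (dayB z :: zs.map dayB)
            = ((popLE l (zs.map dayB)).1 + 1, (popLE l (zs.map dayB)).2) := by
          simp [popLE, hle]
        rw [List.foldl_cons, hstep, ih (c + 1) tail l, hpop]
        have harith : c + ((popLE l (zs.map dayB)).1 + 1) = c + 1 + (popLE l (zs.map dayB)).1 := by
          ring
        rw [harith]

-- B equals groupA on the days list
theorem alt_eq_groupA (progresses speeds : List Int) :
    solution_alt progresses speeds = groupA ((progresses.zip speeds).map dayB) := by
  unfold solution_alt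
  cases hz : progresses.zip speeds with
  | nil => simp [groupA]
  | cons z zs =>
      have hstep : stepB ([], none) z = ([1], some (dayB z)) := by
        simp [stepB, dayB]
      rw [List.foldl_cons, hstep, foldB_group zs 1 [] (dayB z)]
      simp [groupA]

theorem solution_spec : Claim_equal_solution := by
  intro progresses speeds _ hpre
  unfold Spec_solution
  rw [alt_eq_groupA]
  show groupA _ = _
  congr 1
  apply List.map_congr_left
  intro x hx
  have hs : x.2 ≠ 0 := hpre x hx
  have h := ceil_eq (100 - x.1) x.2 hs
  rw [show -(100 - x.1) = x.1 - 100 by ring] at h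
  exact h
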